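-- pv_equiv track=rewrite | github.com/burning-calamity/extirpation | online/route_cipher.py | route_decrypt
-- ===== SOURCE A (Python) =====
-- def route_decrypt(ciphertext: str, width: int = 5) -> str:
--     if width < 2:
--         raise ValueError('width must be >= 2')
--     rows = (len(ciphertext) + width - 1) // width
--     padded = ciphertext.ljust(rows * width)
--     grid = [padded[i * width:(i + 1) * width] for i in range(rows)]
--     out = []
--     for r, row in enumerate(grid):
--         out.append(row[::-1] if r % 2 else row)
--     return ''.join(out).rstrip()
-- ===== SOURCE B (Python) =====
-- def route_decrypt(ciphertext: str, width: int = 5) -> str: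
--     if width < 2:
--         raise ValueError('width must be >= 2')
--     # sparse per-character scatter: send each real character straight to its
--     # destination cell (identity on even rows, mirrored column on odd rows);
--     # cells never written are padding spaces, and everything past the last
--     # written cell is trailing padding that the final rstrip would remove,
--     # so the grid is never materialised.
--     chars = {}
--     last = 0  # one past the highest destination written
--     for i in range(len(ciphertext)):
--         r, c = divmod(i, width)
--         dest = i if r % 2 == 0 else r * width + (width - 1 - c)
--         chars[dest] = ciphertext[i]
--         last = max(last, dest + 1)
--     return ''.join(chars.get(j, ' ') for j in range(last)).rstrip()
-- ===== Notes on version B (the rewrite author's own statement) =====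
-- stated objective: alternative
-- what changed: Replaces A's build-a-grid-of-row-slices-then-reverse-odd-rows strategy with a sparse per-character scatter: each real character's destination cell is computed arithmetically (identity on even rows, mirrored column on odd rows) and stored in a dict, and the result is rendered only up to the last written cell with unwritten cells as spaces, so no grid, no slicing, no reversal and no padding buffer is ever built.
import Mathlib
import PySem

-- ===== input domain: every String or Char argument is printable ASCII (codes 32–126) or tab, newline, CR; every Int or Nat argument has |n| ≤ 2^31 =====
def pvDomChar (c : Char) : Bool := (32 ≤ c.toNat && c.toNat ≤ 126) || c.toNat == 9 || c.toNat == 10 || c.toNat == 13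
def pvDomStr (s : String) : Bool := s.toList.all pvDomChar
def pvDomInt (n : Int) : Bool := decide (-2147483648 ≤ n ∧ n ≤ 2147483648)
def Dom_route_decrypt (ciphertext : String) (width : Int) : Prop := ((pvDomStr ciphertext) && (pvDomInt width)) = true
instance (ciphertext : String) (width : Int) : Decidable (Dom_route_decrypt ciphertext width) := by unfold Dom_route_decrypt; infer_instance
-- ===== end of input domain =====

-- B replaces A's grid-of-row-slices-then-reverse-odd-rows strategy with a sparse per-character
-- scatter: each real character is stored in a dict at its arithmetically computed destination
-- cell and the result is rendered up to the last written cell, unwritten cells being spaces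
-- ("alternative").

-- ===== PORT A =====
def route_decrypt (ciphertext : String) (width : Int) : String :=
  let cs := ciphertext.toList
  let w := width.toNat
  -- rows = (len(ciphertext) + width - 1) // width   (all operands ≥ 0 under Pre_, so Nat division is exact)
  let rows := (cs.length + w - 1) / w
  -- padded = ciphertext.ljust(rows * width)  (ported by hand: pad on the right with spaces; rows*w ≥ len)
  let padded := cs ++ List.replicate (rows * w - cs.length) ' '
  -- grid = [padded[i*width:(i+1)*width] for i in range(rows)]
  let grid := (List.range rows).map (fun i =>
    PySem.List.slice padded (some ((i * w : Nat) : Int)) (some (((i + 1) * w : Nat) : Int)))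
  -- for r, row in enumerate(grid): out.append(row[::-1] if r % 2 else row)   (row[::-1] = reverse)
  let out := (PySem.List.enumerate grid 0).foldl
    (fun acc p => acc ++ (if PySem.Int.mod p.1 2 ≠ 0 then p.2.reverse else p.2)) ([] : List Char)
  String.ofList (PySem.Chars.rstrip out)

-- ===== PORT B =====
def route_decrypt_alt (ciphertext : String) (width : Int) : String :=
  let cs := ciphertext.toList
  let w := width.toNat
  -- chars = {}; last = 0
  -- for i in range(len(ciphertext)): r, c = divmod(i, width);
  --   dest = i if r % 2 == 0 else r*width + (width-1-c); chars[dest] = ciphertext[i]; last = max(last, dest+1)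
  -- (i, r, c, dest are nonnegative ints: divmod on nonnegatives is Nat /,%;
  --  ciphertext[i] with 0 ≤ i < len is getD)
  let st := (List.range cs.length).foldl
    (fun (st : PySem.Dict Nat Char × Nat) i =>
      ((st.1.insert (if i / w % 2 = 0 then i else i / w * w + (w - 1 - i % w)) (cs.getD i ' ')),
        max st.2 ((if i / w % 2 = 0 then i else i / w * w + (w - 1 - i % w)) + 1)))
    (PySem.Dict.empty, 0)
  -- ''.join(chars.get(j, ' ') for j in range(last)) : a join of single characters is their list
  let out := (List.range st.2).map (fun j => st.1.getD j ' ')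
  String.ofList (PySem.Chars.rstrip out)

-- ===== PRECONDITION & SPEC =====
-- Pre_ excludes exactly width < 2, where Python A raises ValueError.
def Pre_route_decrypt (ciphertext : String) (width : Int) : Prop := 2 ≤ width
instance (ciphertext : String) (width : Int) : Decidable (Pre_route_decrypt ciphertext width) := by
  unfold Pre_route_decrypt; infer_instance
def pvWitness_route_decrypt : String × Int := ("attack at dawn", 4)
def Spec_route_decrypt (ciphertext : String) (width : Int) (out : String) : Prop := out = route_decrypt_alt ciphertext width
instance (ciphertext : String) (width : Int) (out : String) : Decidable (Spec_route_decrypt ciphertext width out) := by unfold Spec_route_decrypt; infer_instance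

-- ===== CLAIM (what is proved, stated in full; the proofs are below) =====
def Claim_equal_route_decrypt : Prop := ∀ (ciphertext : String) (width : Int), Dom_route_decrypt ciphertext width → Pre_route_decrypt ciphertext width → Spec_route_decrypt ciphertext width (route_decrypt ciphertext width)

-- ===== LEMMAS AND PROOFS =====

-- B's destination permutation, named for the proofs (the port writes it inline)
def pvDest (w i : Nat) : Nat := if i / w % 2 = 0 then i else i / w * w + (w - 1 - i % w)

-- pvDest is an involution
theorem pvDest_invol (w : Nat) (hw : 0 < w) (i : Nat) : pvDest w (pvDest w i) = i := by
  unfold pvDest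
  have hc : i % w < w := Nat.mod_lt _ hw
  have hdm := Nat.div_add_mod i w
  by_cases hp : i / w % 2 = 0
  · simp [hp]
  · rw [if_neg hp]
    set r := i / w with hr
    set c := i % w with hcc
    have hdiv : (r * w + (w - 1 - c)) / w = r := by
      refine Nat.div_eq_of_lt_le (Nat.le_add_right _ _) ?_
      rw [Nat.succ_mul]; omega
    have hmod : (r * w + (w - 1 - c)) % w = w - 1 - c := by
      rw [Nat.mul_comm r w, Nat.mul_add_mod, Nat.mod_eq_of_lt (by omega)]
    rw [if_neg (by rw [hdiv]; exact hp), hdiv, hmod]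
    have hcc' : w - 1 - (w - 1 - c) = c := by omega
    rw [hcc', Nat.mul_comm]
    omega

-- pvDest maps [0, rows*w) into itself
theorem pvDest_lt (w rows i : Nat) (hw : 0 < w) (hi : i < rows * w) : pvDest w i < rows * w := by
  unfold pvDest
  have hr : i / w < rows := Nat.div_lt_iff_lt_mul hw |>.mpr (by omega)
  by_cases hp : i / w % 2 = 0
  · simpa [hp] using hi
  · rw [if_neg hp]
    have hcw : i % w < w := Nat.mod_lt _ hw
    have hkey : i / w * w + (w - 1 - i % w) < (i / w + 1) * w := by
      rw [Nat.succ_mul]; omega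
    calc i / w * w + (w - 1 - i % w) < (i / w + 1) * w := hkey
      _ ≤ rows * w := Nat.mul_le_mul_right _ (by omega)

-- the dict component of B's loop after k steps: cell j holds the character whose
-- destination is j as soon as its (unique) source pvDest w j < k has been processed
theorem pvScatterDict (cs : List Char) (w : Nat) (hw : 0 < w) :
    ∀ (k j : Nat),
      (((List.range k).foldl
        (fun (st : PySem.Dict Nat Char × Nat) i =>
          ((st.1.insert (if i / w % 2 = 0 then i else i / w * w + (w - 1 - i % w)) (cs.getD i ' ')),
            max st.2 ((if i / w % 2 = 0 then i else i / w * w + (w - 1 - i % w)) + 1)))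
        (PySem.Dict.empty, 0)).1).getD j ' '
      = if pvDest w j < k then cs.getD (pvDest w j) ' ' else ' ' := by
  intro k
  induction k with
  | zero => intro j; simp [PySem.Dict.getD_empty]
  | succ k ih =>
    intro j
    rw [List.range_succ, List.foldl_append, List.foldl_cons, List.foldl_nil]
    have hdest : (if k / w % 2 = 0 then k else k / w * w + (w - 1 - k % w)) = pvDest w k := by
      simp [pvDest]
    dsimp only
    rw [hdest, PySem.Dict.getD_insert]
    by_cases hjk : j = pvDest w k
    · subst hjk
      have hself : pvDest w (pvDest w k) = k := pvDest_invol w hw k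
      rw [if_pos rfl, if_pos (by omega)]
      rw [hself]
    · have hne : pvDest w j ≠ k := by
        intro h
        apply hjk
        rw [← h, pvDest_invol w hw]
      rw [if_neg hjk, ih j]
      by_cases h2 : pvDest w j < k
      · rw [if_pos h2, if_pos (by omega)]
      · rw [if_neg h2, if_neg (by omega)]

-- the 'last' component of B's loop covers the destination of every processed source
theorem pvLastCover (cs : List Char) (w : Nat) :
    ∀ (k : Nat), (∀ i, i < k → pvDest w i <
      ((List.range k).foldl
        (fun (st : PySem.Dict Nat Char × Nat) i =>
          ((st.1.insert (if i / w % 2 = 0 then i else i / w * w + (w - 1 - i % w)) (cs.getD i ' ')),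
            max st.2 ((if i / w % 2 = 0 then i else i / w * w + (w - 1 - i % w)) + 1)))
        (PySem.Dict.empty, 0)).2) := by
  intro k
  induction k with
  | zero => intro i hi; omega
  | succ k ih =>
    intro i hi
    rw [List.range_succ, List.foldl_append, List.foldl_cons, List.foldl_nil]
    have hdest : (if k / w % 2 = 0 then k else k / w * w + (w - 1 - k % w)) = pvDest w k := by
      simp [pvDest]
    dsimp only
    rw [hdest]
    by_cases hik : i = k
    · subst hik; omega
    · have := ih i (by omega)
      omega

-- the 'last' component never exceeds an upper bound on all destinations
theorem pvLastLe (cs : List Char) (w n : Nat) :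
    ∀ (k : Nat), (∀ i, i < k → pvDest w i < n) →
      ((List.range k).foldl
        (fun (st : PySem.Dict Nat Char × Nat) i =>
          ((st.1.insert (if i / w % 2 = 0 then i else i / w * w + (w - 1 - i % w)) (cs.getD i ' ')),
            max st.2 ((if i / w % 2 = 0 then i else i / w * w + (w - 1 - i % w)) + 1)))
        (PySem.Dict.empty, 0)).2 ≤ n := by
  intro k
  induction k with
  | zero => intro _; simp
  | succ k ih =>
    intro hb
    rw [List.range_succ, List.foldl_append, List.foldl_cons, List.foldl_nil]
    have hdest : (if k / w % 2 = 0 then k else k / w * w + (w - 1 - k % w)) = pvDest w k := by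
      simp [pvDest]
    dsimp only
    rw [hdest]
    have h1 := ih (fun i hi => hb i (by omega))
    have h2 := hb k (by omega)
    omega

-- rstrip ignores an all-space suffix
theorem pvRstripSpaces (u v : List Char) (h : ∀ c ∈ v, c = ' ') :
    PySem.Chars.rstrip (u ++ v) = PySem.Chars.rstrip u := by
  unfold PySem.Chars.rstrip
  rw [List.reverse_append, List.dropWhile_append]
  have hnil : v.reverse.dropWhile PySem.Chars.isspace = [] := by
    rw [List.dropWhile_eq_nil_iff]
    intro c hc
    rw [h c (List.mem_reverse.mp hc)]
    decide
  rw [hnil]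
  rfl

-- A's enumerate/append loop over the grid is the flatten of its rows with every odd row reversed
theorem pvChunks (l : List Char) (w : Nat) :
    ∀ k,
    (PySem.List.enumerate ((List.range k).map (fun i =>
        PySem.List.slice l (some ((i * w : Nat) : Int)) (some (((i + 1) * w : Nat) : Int)))) 0).flatMap
      (fun p => if PySem.Int.mod p.1 2 ≠ 0 then p.2.reverse else p.2)
    = ((List.range k).map (fun r =>
        if r % 2 = 0 then
          PySem.List.slice l (some ((r * w : Nat) : Int)) (some (((r + 1) * w : Nat) : Int))
        else
          (PySem.List.slice l (some ((r * w : Nat) : Int)) (some (((r + 1) * w : Nat) : Int))).reverse)).flatten := by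
  intro k
  induction k with
  | zero => simp
  | succ k ih =>
    rw [List.range_succ, List.map_append, PySem.List.enumerate_append, List.flatMap_append, ih,
      List.map_append, List.flatten_append]
    have hlen : ((List.range k).map (fun i =>
        PySem.List.slice l (some ((i * w : Nat) : Int)) (some (((i + 1) * w : Nat) : Int)))).length = k := by
      simp
    rw [hlen]
    simp only [List.map_cons, List.map_nil, PySem.List.enumerate_cons, PySem.List.enumerate_nil,
      List.flatMap_cons, List.flatMap_nil, List.append_nil, List.flatten_cons, List.flatten_nil]
    congr 1
    have hmod : PySem.Int.mod ((0 : Int) + (k : Int)) 2 = ((k % 2 : Nat) : Int) := by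
      rw [PySem.Int.mod_eq_emod_of_pos] <;> omega
    rw [hmod]
    by_cases hpar : k % 2 = 0
    · rw [if_neg (by simp [hpar]), if_pos hpar]
    · rw [if_pos (by exact_mod_cast hpar), if_neg hpar]

-- length of a flatten of k rows of length w each
theorem pvFlatLen (F : Nat → List Char) (w : Nat) :
    ∀ k, (∀ r, r < k → (F r).length = w) →
      (((List.range k).map F).flatten).length = k * w := by
  intro k
  induction k with
  | zero => intro _; simp
  | succ k ih =>
    intro hl
    rw [List.range_succ, List.map_append, List.flatten_append, List.length_append,
      ih (fun r hr => hl r (by omega))]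
    simp [hl k (by omega)]
    ring

-- indexing a flatten of k rows of length w each
theorem pvFlatGet (F : Nat → List Char) (w : Nat) :
    ∀ k, (∀ r, r < k → (F r).length = w) →
      ∀ j, j < k * w →
      (((List.range k).map F).flatten).getD j ' ' = (F (j / w)).getD (j % w) ' ' := by
  intro k
  induction k with
  | zero => intro _ j hj; omega
  | succ k ih =>
    intro hl j hj
    have hl' : ∀ r, r < k → (F r).length = w := fun r hr => hl r (by omega)
    rw [List.range_succ, List.map_append, List.flatten_append]
    by_cases hlt : j < k * w
    · rw [List.getD_append _ _ _ _ (by rw [pvFlatLen F w k hl']; exact hlt)]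
      exact ih hl' j hlt
    · rw [List.getD_append_right _ _ _ _ (by rw [pvFlatLen F w k hl']; omega),
        pvFlatLen F w k hl']
      have hdiv : j / w = k := Nat.div_eq_of_lt_le (by omega) (by simpa using hj)
      have hdm := Nat.div_add_mod j w
      rw [hdiv, Nat.mul_comm] at hdm
      have hmod : j % w = j - k * w := by omega
      rw [hdiv, hmod]
      simp

-- getD of a row slice of padded text, in terms of padded itself
theorem pvSliceGet (l : List Char) (a w c : Nat) (hc : c < w) (h : a + w ≤ l.length) :
    ((l.drop a).take w).getD c ' ' = l.getD (a + c) ' ' := by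
  have h1 : c < ((l.drop a).take w).length := by simp; omega
  have h2 : a + c < l.length := by omega
  rw [List.getD_eq_getElem _ _ h1, List.getD_eq_getElem _ _ h2]
  simp [List.getElem_take, List.getElem_drop]

-- ===== VERDICT (by name: the statement is the Claim_ definition above) =====
theorem route_decrypt_spec : Claim_equal_route_decrypt := by
  intro ciphertext width _ hpre
  unfold Spec_route_decrypt route_decrypt route_decrypt_alt
  dsimp only
  set cs := ciphertext.toList with hcs
  have hw : 0 < width.toNat := by
    unfold Pre_route_decrypt at hpre; omega
  set w := width.toNat with hwdef
  set rows := (cs.length + w - 1) / w with hrows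
  have hle : cs.length ≤ rows * w := by
    have h := Nat.div_add_mod (cs.length + w - 1) w
    have h2 := Nat.mod_lt (cs.length + w - 1) hw
    rw [hrows, Nat.mul_comm]
    omega
  set n := rows * w with hn
  set padded := cs ++ List.replicate (n - cs.length) ' ' with hpadded
  have hplen : padded.length = n := by
    simp [hpadded]; omega
  -- A's loop is the flatten of rows with odd rows reversed
  rw [PySem.List.foldl_append_eq_flatMap, List.nil_append, pvChunks padded w rows]
  set F := (fun r =>
    if r % 2 = 0 then
      PySem.List.slice padded (some ((r * w : Nat) : Int)) (some (((r + 1) * w : Nat) : Int))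
    else
      (PySem.List.slice padded (some ((r * w : Nat) : Int)) (some (((r + 1) * w : Nat) : Int))).reverse)
    with hF
  have hrowshape : ∀ r, r < rows →
      PySem.List.slice padded (some ((r * w : Nat) : Int)) (some (((r + 1) * w : Nat) : Int))
        = (padded.drop (r * w)).take w := by
    intro r hr
    rw [PySem.List.slice_natCast]
    congr 1
    rw [Nat.succ_mul, Nat.add_sub_cancel_left]
  have hFlen : ∀ r, r < rows → (F r).length = w := by
    intro r hr
    have hb : r * w + w ≤ n := by
      have h1 : (r + 1) * w ≤ rows * w := Nat.mul_le_mul_right _ (by omega)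
      rw [Nat.succ_mul] at h1
      omega
    rw [hF]
    dsimp only
    rw [hrowshape r hr]
    by_cases hp : r % 2 = 0 <;> simp [hp] <;> omega
  -- A's full (unstripped) text, element by element: position j reads padded at pvDest w j
  have hAlen : (((List.range rows).map F).flatten).length = n := pvFlatLen F w rows hFlen
  have hAget : ∀ j, j < n →
      (((List.range rows).map F).flatten).getD j ' ' = padded.getD (pvDest w j) ' ' := by
    intro j hj
    rw [pvFlatGet F w rows hFlen j hj]
    have hr : j / w < rows := Nat.div_lt_iff_lt_mul hw |>.mpr (by omega)
    have hc : j % w < w := Nat.mod_lt _ hw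
    have hb : j / w * w + w ≤ n := by
      have h3 : (j / w + 1) * w ≤ rows * w := Nat.mul_le_mul_right _ (by omega)
      rw [Nat.succ_mul] at h3
      omega
    have hdm := Nat.div_add_mod j w
    rw [hF]
    dsimp only
    rw [hrowshape (j / w) hr]
    by_cases hp : j / w % 2 = 0
    · rw [if_pos hp, pvSliceGet padded (j / w * w) w (j % w) hc (by omega)]
      unfold pvDest
      rw [if_pos hp]
      congr 1
      rw [Nat.mul_comm]
      omega
    · rw [if_neg hp]
      have hlen : ((padded.drop (j / w * w)).take w).length = w := by simp; omega
      have h1' : j % w < ((padded.drop (j / w * w)).take w).reverse.length := by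
        rw [List.length_reverse, hlen]; exact hc
      rw [List.getD_eq_getElem _ ' ' h1', List.getElem_reverse]
      rw [← List.getD_eq_getElem, hlen]
      rw [pvSliceGet padded (j / w * w) w (w - 1 - j % w) (by omega) (by omega)]
      unfold pvDest
      rw [if_neg hp]
  -- B's loop state
  set st := (List.range cs.length).foldl
    (fun (st : PySem.Dict Nat Char × Nat) i =>
      ((st.1.insert (if i / w % 2 = 0 then i else i / w * w + (w - 1 - i % w)) (cs.getD i ' ')),
        max st.2 ((if i / w % 2 = 0 then i else i / w * w + (w - 1 - i % w)) + 1)))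
    (PySem.Dict.empty, 0) with hst
  have hdict := pvScatterDict cs w hw cs.length
  have hcover := pvLastCover cs w cs.length
  have hlastle : st.2 ≤ n := by
    rw [hst]
    exact pvLastLe cs w n cs.length (fun i hi => pvDest_lt w rows i hw (by omega))
  rw [← hst] at hdict hcover
  -- padded, element by element
  have hpget : ∀ t, t < n →
      padded.getD t ' ' = if t < cs.length then cs.getD t ' ' else ' ' := by
    intro t ht
    by_cases h : t < cs.length
    · rw [if_pos h, hpadded, List.getD_append _ _ _ _ h]
    · rw [if_neg h, hpadded, List.getD_append_right _ _ _ _ (by omega)]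
      have : t - cs.length < n - cs.length := by omega
      rw [List.getD_eq_getElem _ _ (by simpa using this), List.getElem_replicate]
  -- B's rendered text is the prefix of A's full text up to st.2, and the rest of A's is spaces
  have hout : (List.range st.2).map (fun j => st.1.getD j ' ')
      = (((List.range rows).map F).flatten).take st.2 := by
    apply List.ext_getElem
    · simp [hAlen]; omega
    · intro j h1 h2
      have hj : j < st.2 := by simpa using h1
      have hjn : j < n := by omega
      rw [List.getElem_take, List.getElem_map, List.getElem_range]
      rw [← List.getD_eq_getElem _ ' ' (by omega), hAget j hjn,
        hpget (pvDest w j) (pvDest_lt w rows j hw hjn), hdict j]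
  have hrest : ∀ c ∈ (((List.range rows).map F).flatten).drop st.2, c = ' ' := by
    intro c hc
    rw [List.mem_iff_getElem] at hc
    obtain ⟨t, ht, hval⟩ := hc
    rw [List.getElem_drop] at hval
    have htn : st.2 + t < n := by rw [List.length_drop, hAlen] at ht; omega
    have hge : ¬ pvDest w (st.2 + t) < cs.length := by
      intro hlt
      have := hcover (pvDest w (st.2 + t)) hlt
      rw [pvDest_invol w hw] at this
      omega
    rw [← List.getD_eq_getElem _ ' ' (by omega), hAget (st.2 + t) htn,
      hpget (pvDest w (st.2 + t)) (pvDest_lt w rows (st.2 + t) hw htn), if_neg hge] at hval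
    exact hval.symm
  -- assemble: rstrip kills exactly the all-space tail
  congr 1
  rw [hout, ← pvRstripSpaces ((((List.range rows).map F).flatten).take st.2)
      ((((List.range rows).map F).flatten).drop st.2) hrest,
    List.take_append_drop]
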